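-- pv_equiv track=rewrite | github.com/Club-ALTech/crc2026-prelim | Prelim_special/game_visuals.py | compute_pixel_y
-- ===== SOURCE A (Python) =====
-- FLOOR_SIZE = 40         # 60×60
--
-- WALL_THICKNESS = 6     # 10 px thickness
--
-- def compute_pixel_y(y):
--     py = 0
--     for j in range(y):
--         if j % 2 == 1:     # odd = floor tile or vertical wall
--             py += FLOOR_SIZE
--         else:             # even = horizontal wall or connector
--             py += WALL_THICKNESS
--     return py
-- ===== SOURCE B (Python) =====
-- FLOOR_SIZE = 40         # 60×60
--
-- WALL_THICKNESS = 6     # 10 px thickness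
--
-- def compute_pixel_y(y):
--     # closed form: among 0..y-1 there are y//2 odd indices (floor tiles)
--     # and (y+1)//2 even indices (wall rows)
--     if y <= 0:
--         return 0
--     return (y // 2) * FLOOR_SIZE + ((y + 1) // 2) * WALL_THICKNESS
-- ===== Notes on version B (the rewrite author's own statement) =====
-- stated objective: faster
-- what changed: Replaces the O(y) accumulation loop over range(y) with a closed-form count of odd and even indices: (y//2)*FLOOR_SIZE + ((y+1)//2)*WALL_THICKNESS.
import Mathlib
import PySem

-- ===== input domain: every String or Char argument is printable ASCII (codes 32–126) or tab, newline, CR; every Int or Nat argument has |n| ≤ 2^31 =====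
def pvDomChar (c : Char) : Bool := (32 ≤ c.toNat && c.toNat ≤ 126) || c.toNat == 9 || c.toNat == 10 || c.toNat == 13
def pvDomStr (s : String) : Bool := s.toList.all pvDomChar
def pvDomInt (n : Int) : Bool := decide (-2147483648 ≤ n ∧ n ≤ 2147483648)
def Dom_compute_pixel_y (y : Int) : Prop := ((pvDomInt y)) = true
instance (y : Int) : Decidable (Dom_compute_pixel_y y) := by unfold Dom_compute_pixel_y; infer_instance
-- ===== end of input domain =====

-- B replaces A's O(y) loop with the O(1) closed form (y//2)*40 + ((y+1)//2)*6 (return value only).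

-- ===== PORT A =====
def compute_pixel_y (y : Int) : Int :=
  (PySem.List.pyRange 0 y 1).foldl
    (fun py j => if PySem.Int.mod j 2 = 1 then py + 40 else py + 6) 0

-- ===== PORT B =====
def compute_pixel_y_alt (y : Int) : Int :=
  if y ≤ 0 then 0
  else PySem.Int.floordiv y 2 * 40 + PySem.Int.floordiv (y + 1) 2 * 6

-- ===== PRECONDITION & SPEC =====
def Spec_compute_pixel_y (y : Int) (out : Int) : Prop := out = compute_pixel_y_alt y
instance (y : Int) (out : Int) : Decidable (Spec_compute_pixel_y y out) := by unfold Spec_compute_pixel_y; infer_instance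

-- ===== CLAIM (what is proved, stated in full; the proofs are below) =====
def Claim_equal_compute_pixel_y : Prop := ∀ (y : Int), Dom_compute_pixel_y y → Spec_compute_pixel_y y (compute_pixel_y y)

-- ===== LEMMAS AND PROOFS =====

theorem foldl_shift (l : List Int) (c : Int) :
    l.foldl (fun py j => if PySem.Int.mod j 2 = 1 then py + 40 else py + 6) c
      = c + l.foldl (fun py j => if PySem.Int.mod j 2 = 1 then py + 40 else py + 6) 0 := by
  induction l generalizing c with
  | nil => simp
  | cons x xs ih =>
      simp only [List.foldl_cons]
      rw [ih, ih (if PySem.Int.mod x 2 = 1 then (0:Int) + 40 else 0 + 6)]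
      split_ifs <;> ring

theorem loop_closed (n : Nat) :
    compute_pixel_y (n : Int)
      = PySem.Int.floordiv (n : Int) 2 * 40 + PySem.Int.floordiv ((n : Int) + 1) 2 * 6 := by
  induction n with
  | zero => decide
  | succ m ih =>
      unfold compute_pixel_y at *
      rw [show ((m + 1 : Nat) : Int) = (m : Int) + 1 by push_cast; ring,
          PySem.List.pyRange_one_succ_right (by exact_mod_cast Int.natCast_nonneg m),
          List.foldl_append]
      simp only [List.foldl_cons, List.foldl_nil]
      rw [foldl_shift, ih]
      simp only [PySem.Int.floordiv_eq_ediv_of_pos (show (0:Int) < 2 by norm_num),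
          PySem.Int.mod_eq_emod_of_pos (show (0:Int) < 2 by norm_num)]
      split_ifs with hm <;> omega

-- ===== VERDICT (by name: the statement is the Claim_ definition above) =====
theorem compute_pixel_y_spec : Claim_equal_compute_pixel_y := by
  intro y _
  unfold Spec_compute_pixel_y compute_pixel_y_alt
  by_cases h : y ≤ 0
  · rw [if_pos h]
    unfold compute_pixel_y
    rw [PySem.List.pyRange_one_eq_nil (by omega)]
    rfl
  · rw [if_neg h]
    obtain ⟨n, rfl⟩ : ∃ n : Nat, y = (n : Int) :=
      ⟨y.toNat, by omega⟩
    exact loop_closed n
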